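-- pv_equiv track=rewrite | github.com/cashmoneycolors/QuantumAvatar | CashMoneyColors_App/utils/helpers.py | clean_response_text
-- ===== SOURCE A (Python) =====
-- def clean_response_text(text: str) -> str:
--     """Clean AI response text"""
--     # Remove excessive whitespace
--     text = ' '.join(text.split())
--
--     # Remove common AI artifacts
--     artifacts = [
--         "As an AI",
--         "I am an AI",
--         "As Grok",
--         "Here's the information",
--         "Let me help you"
--     ]
--
--     lines = text.split('\n')
--     cleaned_lines = []
--
--     for line in lines:
--         if any(artifact.lower() in line.lower() for artifact in artifacts) and len(line.strip()) < 100: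
--             continue  # Skip introductory lines
--         cleaned_lines.append(line)
--
--     return '\n'.join(cleaned_lines).strip()
-- ===== SOURCE B (Python) =====
-- def clean_response_text(text: str) -> str:
--     """Clean AI response text"""
--     # ' '.join(text.split()) leaves no newlines and no edge whitespace,
--     # so A's per-line loop runs exactly once on the whole collapsed string.
--     t = ' '.join(text.split())
--
--     artifacts = [
--         "As an AI",
--         "I am an AI",
--         "As Grok",
--         "Here's the information",
--         "Let me help you"
--     ]
--
--     low = t.lower()
--     if any(a.lower() in low for a in artifacts) and len(t) < 100:
--         return ''
--     return t
-- ===== Notes on version B (the rewrite author's own statement) =====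
-- stated objective: simpler
-- what changed: Whitespace collapsing removes every newline, so the per-line split/filter/join/strip pipeline degenerates to a single guarded conditional on the collapsed string; B drops the lines/cleaned_lines lists and the loop entirely.
import Mathlib
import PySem

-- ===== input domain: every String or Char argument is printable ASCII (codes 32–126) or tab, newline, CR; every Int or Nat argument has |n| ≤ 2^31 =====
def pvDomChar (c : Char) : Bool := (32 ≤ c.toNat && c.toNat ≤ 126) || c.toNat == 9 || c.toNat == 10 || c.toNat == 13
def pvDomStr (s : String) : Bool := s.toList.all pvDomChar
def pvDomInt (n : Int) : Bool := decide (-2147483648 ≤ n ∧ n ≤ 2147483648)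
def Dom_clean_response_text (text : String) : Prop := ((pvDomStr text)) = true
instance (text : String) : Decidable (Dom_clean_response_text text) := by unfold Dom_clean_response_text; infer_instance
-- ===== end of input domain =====

-- B collapses whitespace once and replaces A's degenerate one-iteration line loop by a single
-- guarded conditional (objective: simpler).

-- the artifact list both Python sources carry literally
def pyArtifacts : List String :=
  ["As an AI", "I am an AI", "As Grok", "Here's the information", "Let me help you"]

-- ===== PORT A =====
def clean_response_text (text : String) : String :=
  let text := PySem.Str.join " " (PySem.Str.split₀ text)
  -- text.split('\n'); PySem.Str.split? is none only for an empty separator, so getD [] is never taken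
  let lines := (PySem.Str.split? text "\n").getD []
  let cleaned_lines := lines.foldl (fun acc line =>
    if (pyArtifacts.any fun artifact =>
          PySem.Str.isIn (PySem.Str.lower artifact) (PySem.Str.lower line))
        && PySem.Str.len (PySem.Str.strip line) < 100 then
      acc  -- continue: skip introductory lines
    else
      acc ++ [line]) []
  PySem.Str.strip (PySem.Str.join "\n" cleaned_lines)

-- ===== PORT B =====
def clean_response_text_alt (text : String) : String :=
  let t := PySem.Str.join " " (PySem.Str.split₀ text)
  let low := PySem.Str.lower t
  if (pyArtifacts.any fun a => PySem.Str.isIn (PySem.Str.lower a) low)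
      && PySem.Str.len t < 100 then
    ""
  else
    t

-- ===== PRECONDITION & SPEC =====
def Spec_clean_response_text (text : String) (out : String) : Prop := out = clean_response_text_alt text
instance (text : String) (out : String) : Decidable (Spec_clean_response_text text out) := by unfold Spec_clean_response_text; infer_instance

-- ===== CLAIM (what is proved, stated in full; the proofs are below) =====
def Claim_equal_clean_response_text : Prop := ∀ (text : String), Dom_clean_response_text text → Spec_clean_response_text text (clean_response_text text)

-- ===== LEMMAS AND PROOFS =====

-- the invariant of str.split()'s pieces
def Good (ps : List (List Char)) : Prop :=
  ∀ p ∈ ps, p ≠ [] ∧ ∀ c ∈ p, PySem.Chars.isspace c = false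

lemma reverse_ne_nil_of_not_isEmpty {cur : List Char} (h : ¬ cur.isEmpty = true) :
    cur.reverse ≠ [] := by
  simp only [List.isEmpty_iff] at h
  simp [h]

-- every piece produced by str.split() is nonempty and whitespace-free
lemma split₀_go_good (s : List Char) : ∀ (cur : List Char) (acc : List (List Char)),
    (∀ c ∈ cur, PySem.Chars.isspace c = false) →
    (∀ p ∈ acc, p ≠ [] ∧ ∀ c ∈ p, PySem.Chars.isspace c = false) →
    ∀ p ∈ PySem.Chars.split₀.go s cur acc, p ≠ [] ∧ ∀ c ∈ p, PySem.Chars.isspace c = false := by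
  induction s with
  | nil =>
    intro cur acc hcur hacc p hp
    simp only [PySem.Chars.split₀.go] at hp
    split at hp
    · exact hacc p (List.mem_reverse.mp hp)
    · rcases List.mem_cons.mp (List.mem_reverse.mp hp) with h | h
      · subst h
        exact ⟨reverse_ne_nil_of_not_isEmpty (by assumption),
          fun c hc => hcur c (List.mem_reverse.mp hc)⟩
      · exact hacc p h
  | cons c rest ih =>
    intro cur acc hcur hacc p hp
    simp only [PySem.Chars.split₀.go] at hp
    split at hp
    · split at hp
      · exact ih [] acc (by simp) hacc p hp
      · refine ih [] (cur.reverse :: acc) (by simp) ?_ p hp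
        intro q hq
        rcases List.mem_cons.mp hq with h | h
        · subst h
          exact ⟨reverse_ne_nil_of_not_isEmpty (by assumption),
            fun d hd => hcur d (List.mem_reverse.mp hd)⟩
        · exact hacc q h
    · refine ih (c :: cur) acc ?_ hacc p hp
      intro d hd
      rcases List.mem_cons.mp hd with h | h
      · subst h
        simpa using (by assumption : ¬ PySem.Chars.isspace d = true)
      · exact hcur d h

lemma split₀_good (cs : List Char) :
    ∀ p ∈ PySem.Chars.split₀ cs, p ≠ [] ∧ ∀ c ∈ p, PySem.Chars.isspace c = false := by
  intro p hp
  exact split₀_go_good cs [] [] (by simp) (by simp) p hp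

lemma join_mem (ps : List (List Char)) (h : Good ps) :
    ∀ c ∈ PySem.Chars.join [' '] ps, c = ' ' ∨ PySem.Chars.isspace c = false := by
  induction ps with
  | nil => simp [PySem.Chars.join_nil]
  | cons p rest ih =>
    intro c hc
    rcases rest with _ | ⟨q, rest'⟩
    · rw [PySem.Chars.join_singleton] at hc
      exact Or.inr ((h p (by simp)).2 c hc)
    · rw [PySem.Chars.join_cons_cons] at hc
      rcases List.mem_append.mp hc with hc | hc
      · rcases List.mem_append.mp hc with hc | hc
        · exact Or.inr ((h p (by simp)).2 c hc)
        · left; simpa using hc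
      · exact ih (fun r hr => h r (by simp [hr])) c hc

lemma join_ne_nil (ps : List (List Char)) (h : Good ps) (hne : ps ≠ []) :
    PySem.Chars.join [' '] ps ≠ [] := by
  rcases ps with _ | ⟨p, rest⟩
  · exact absurd rfl hne
  · rcases rest with _ | ⟨q, rest'⟩
    · rw [PySem.Chars.join_singleton]; exact (h p (by simp)).1
    · rw [PySem.Chars.join_cons_cons]
      simp [(h p (by simp)).1]

lemma join_head (ps : List (List Char)) (h : Good ps) :
    ∀ c, (PySem.Chars.join [' '] ps).head? = some c → PySem.Chars.isspace c = false := by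
  intro c hc
  rcases ps with _ | ⟨p, rest⟩
  · rw [PySem.Chars.join_nil] at hc; simp at hc
  · have hp := h p (by simp)
    rcases rest with _ | ⟨q, rest'⟩
    · rw [PySem.Chars.join_singleton] at hc
      exact hp.2 c (List.mem_of_mem_head? hc)
    · rw [PySem.Chars.join_cons_cons] at hc
      rcases p with _ | ⟨d, p'⟩
      · exact absurd rfl hp.1
      · simp only [List.cons_append, List.head?_cons, Option.some.injEq] at hc
        subst hc
        exact hp.2 _ (by simp)

lemma join_last (ps : List (List Char)) (h : Good ps) :
    ∀ c, (PySem.Chars.join [' '] ps).getLast? = some c → PySem.Chars.isspace c = false := by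
  induction ps with
  | nil => rw [PySem.Chars.join_nil]; simp
  | cons p rest ih =>
    intro c hc
    rcases rest with _ | ⟨q, rest'⟩
    · rw [PySem.Chars.join_singleton] at hc
      exact (h p (by simp)).2 c (List.mem_of_mem_getLast? hc)
    · rw [PySem.Chars.join_cons_cons] at hc
      have hne : PySem.Chars.join [' '] (q :: rest') ≠ [] :=
        join_ne_nil _ (fun r hr => h r (by simp [hr])) (by simp)
      rw [List.getLast?_append_of_ne_nil _ hne] at hc
      exact ih (fun r hr => h r (by simp [hr])) c hc

lemma strip_eq_self (t : List Char)
    (hh : ∀ c, t.head? = some c → PySem.Chars.isspace c = false)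
    (hl : ∀ c, t.getLast? = some c → PySem.Chars.isspace c = false) :
    PySem.Chars.strip t = t := by
  have hls : PySem.Chars.lstrip t = t := by
    unfold PySem.Chars.lstrip
    cases t with
    | nil => rfl
    | cons a t' =>
      rw [List.dropWhile_cons, if_neg (by simp [hh a rfl])]
  have hrs : PySem.Chars.rstrip t = t := by
    unfold PySem.Chars.rstrip
    cases hr : t.reverse with
    | nil =>
      have ht : t = [] := List.reverse_eq_nil_iff.mp hr
      subst ht; rfl
    | cons b r =>
      have hb : PySem.Chars.isspace b = false := by
        apply hl
        rw [← List.head?_reverse, hr, List.head?_cons]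
      rw [List.dropWhile_cons, if_neg (by simp [hb]), ← hr, List.reverse_reverse]
  unfold PySem.Chars.strip
  rw [hls, hrs]

-- splitting on '\n' when '\n' does not occur returns the whole string
lemma splitOn_go_no_nl (l : List Char) : ∀ (fuel : Nat) (cur : List Char) (acc : List (List Char)),
    l.length < fuel → '\n' ∉ l →
    PySem.Chars.splitOn.go ['\n'] fuel l cur acc = ((cur.reverse ++ l) :: acc).reverse := by
  induction l with
  | nil =>
    intro fuel cur acc hf _
    cases fuel with
    | zero => omega
    | succ n => simp [PySem.Chars.splitOn.go]
  | cons c rest ih =>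
    intro fuel cur acc hf hnl
    cases fuel with
    | zero => simp at hf
    | succ n =>
      have hcne : ('\n' == c) = false := by
        simp only [beq_eq_false_iff_ne, ne_eq]
        intro hh; exact hnl (by simp [← hh])
      simp only [PySem.Chars.splitOn.go, List.isPrefixOf, hcne, Bool.false_and,
        if_neg Bool.false_ne_true]
      rw [ih n (c :: cur) acc (by simpa using hf) (fun hm => hnl (by simp [hm]))]
      simp

lemma splitOn_no_nl (cs : List Char) (h : '\n' ∉ cs) :
    PySem.Chars.splitOn cs ['\n'] = [cs] := by
  unfold PySem.Chars.splitOn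
  rw [splitOn_go_no_nl cs (cs.length + 1) [] [] (by omega) h]
  simp

-- ===== VERDICT (by name: the statement is the Claim_ definition above) =====
theorem clean_response_text_spec : Claim_equal_clean_response_text := by
  intro text _
  unfold Spec_clean_response_text
  have hgood : Good (PySem.Chars.split₀ text.toList) := split₀_good text.toList
  set t : List Char := PySem.Chars.join [' '] (PySem.Chars.split₀ text.toList) with htdef
  have hjoin : PySem.Str.join " " (PySem.Str.split₀ text) = String.ofList t := by
    rw [htdef]
    simp [PySem.Str.join, PySem.Str.split₀, Function.comp_def]
  have hnl : '\n' ∉ t := by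
    intro hm
    rcases join_mem _ hgood '\n' hm with h | h
    · simp at h
    · simp [PySem.Chars.isspace] at h
  have hstrip : PySem.Chars.strip t = t :=
    strip_eq_self t (join_head _ hgood) (join_last _ hgood)
  have hsplit : (PySem.Str.split? (String.ofList t) "\n").getD [] = [String.ofList t] := by
    simp [PySem.Str.split?, PySem.Chars.split?, splitOn_no_nl t hnl]
  have hstripS : PySem.Str.strip (String.ofList t) = String.ofList t := by
    simp [PySem.Str.strip, hstrip]
  simp only [clean_response_text, clean_response_text_alt, hjoin, hsplit, List.foldl, hstripS]
  by_cases hc : ((pyArtifacts.any fun a =>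
      PySem.Str.isIn (PySem.Str.lower a) (PySem.Str.lower (String.ofList t)))
        && decide (PySem.Str.len (String.ofList t) < 100)) = true
  · rw [if_pos hc, if_pos hc]
    decide
  · rw [if_neg hc, if_neg hc]
    simp [PySem.Str.join, PySem.Chars.join_singleton, PySem.Str.strip, hstrip]
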